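-- pv_equiv track=rewrite | github.com/ZeshanA/transport | services/predictor/stop_to_stop.py | get_route_segment
-- ===== SOURCE A (Python) =====
-- def get_route_segment(stop_list, from_stop, to_stop):
--     from_stop_idx, to_stop_idx = 0, 0
--     for i, stop in enumerate(stop_list):
--         if stop['id'] == from_stop:
--             from_stop_idx = i
--         if stop['id'] == to_stop:
--             to_stop_idx = i
--     return stop_list[from_stop_idx:to_stop_idx + 1]
-- ===== SOURCE B (Python) =====
-- def get_route_segment(stop_list, from_stop, to_stop):
--     def last_index(target):
--         n = len(stop_list)
--         for i, stop in enumerate(reversed(stop_list)):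
--             if stop['id'] == target:
--                 return n - 1 - i
--         return 0
--     return stop_list[last_index(from_stop):last_index(to_stop) + 1]
-- ===== Notes on version B (the rewrite author's own statement) =====
-- stated objective: alternative
-- what changed: Replaces A's single fused forward loop that keeps updating both indices with two independent backward scans (over reversed(stop_list)) that early-return at the first match seen from the end, i.e. the last occurrence; not-found still yields 0.
import Mathlib
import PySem

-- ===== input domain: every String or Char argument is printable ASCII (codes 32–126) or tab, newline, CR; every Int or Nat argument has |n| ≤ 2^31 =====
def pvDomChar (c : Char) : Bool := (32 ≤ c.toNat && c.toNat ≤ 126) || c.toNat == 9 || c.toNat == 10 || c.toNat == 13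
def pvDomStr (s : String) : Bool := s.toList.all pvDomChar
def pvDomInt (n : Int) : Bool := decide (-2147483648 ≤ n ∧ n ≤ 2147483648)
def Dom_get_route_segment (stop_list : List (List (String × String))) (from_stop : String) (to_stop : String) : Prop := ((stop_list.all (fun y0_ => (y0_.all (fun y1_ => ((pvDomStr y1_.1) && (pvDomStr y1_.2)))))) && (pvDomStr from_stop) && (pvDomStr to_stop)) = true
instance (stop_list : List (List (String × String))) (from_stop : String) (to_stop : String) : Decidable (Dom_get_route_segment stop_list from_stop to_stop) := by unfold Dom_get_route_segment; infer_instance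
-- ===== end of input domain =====

-- B replaces A's fused forward loop with two independent backward scans that
-- early-return at the last occurrence; same O(n) cost, different decomposition.

-- ===== PORT A =====
def get_route_segment (stop_list : List (List (String × String))) (from_stop : String) (to_stop : String) : List (List (String × String)) :=
  let acc := (PySem.List.enumerate stop_list).foldl
    (fun (acc : Int × Int) p =>
      let acc := if (PySem.Dict.mk p.2).get? "id" == some from_stop then (p.1, acc.2) else acc
      let acc := if (PySem.Dict.mk p.2).get? "id" == some to_stop then (acc.1, p.1) else acc
      acc) (0, 0)
  PySem.List.slice stop_list (some acc.1) (some (acc.2 + 1))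

-- ===== PORT B =====
-- the reversed for-loop with early return, as find? over enumerate(reversed(stop_list))
def altLastIndex (stop_list : List (List (String × String))) (target : String) : Int :=
  match (PySem.List.enumerate stop_list.reverse).find?
      (fun p => (PySem.Dict.mk p.2).get? "id" == some target) with
  | some p => (stop_list.length : Int) - 1 - p.1
  | none => 0

def get_route_segment_alt (stop_list : List (List (String × String))) (from_stop : String) (to_stop : String) : List (List (String × String)) :=
  PySem.List.slice stop_list (some (altLastIndex stop_list from_stop)) (some (altLastIndex stop_list to_stop + 1))

-- ===== PRECONDITION & SPEC =====
-- Pre_ excludes exactly the inputs where some stop lacks the key "id": there the Python A raises KeyError.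
def Pre_get_route_segment (stop_list : List (List (String × String))) (from_stop : String) (to_stop : String) : Prop :=
  stop_list.all (fun s => (PySem.Dict.mk s).contains "id") = true
instance (stop_list : List (List (String × String))) (from_stop : String) (to_stop : String) : Decidable (Pre_get_route_segment stop_list from_stop to_stop) := by unfold Pre_get_route_segment; infer_instance

def pvWitness_get_route_segment : (List (List (String × String))) × String × String :=
  ([[("id", "a")], [("id", "b")]], "a", "b")

def Spec_get_route_segment (stop_list : List (List (String × String))) (from_stop : String) (to_stop : String) (out : List (List (String × String))) : Prop := out = get_route_segment_alt stop_list from_stop to_stop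
instance (stop_list : List (List (String × String))) (from_stop : String) (to_stop : String) (out : List (List (String × String))) : Decidable (Spec_get_route_segment stop_list from_stop to_stop out) := by unfold Spec_get_route_segment; infer_instance

-- ===== CLAIM (what is proved, stated in full; the proofs are below) =====
def Claim_equal_get_route_segment : Prop := ∀ (stop_list : List (List (String × String))) (from_stop : String) (to_stop : String), Dom_get_route_segment stop_list from_stop to_stop → Pre_get_route_segment stop_list from_stop to_stop → Spec_get_route_segment stop_list from_stop to_stop (get_route_segment stop_list from_stop to_stop)

-- ===== LEMMAS AND PROOFS =====

-- last index matching q in l (indices counted from s), default a: what A's loop maintains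
def lastF (q : List (String × String) → Bool) : List (List (String × String)) → Int → Int → Int
  | [], _, a => a
  | x :: xs, s, a => lastF q xs (s + 1) (if q x then s else a)

theorem foldA_eq_lastF (q1 q2 : List (String × String) → Bool) :
    ∀ (l : List (List (String × String))) (s : Int) (a b : Int),
    (PySem.List.enumerate l s).foldl
      (fun (acc : Int × Int) p =>
        if q2 p.2 then ((if q1 p.2 then (p.1, acc.2) else acc).1, p.1)
        else if q1 p.2 then (p.1, acc.2) else acc) (a, b)
    = (lastF q1 l s a, lastF q2 l s b) := by
  intro l
  induction l with
  | nil => intro s a b; simp [PySem.List.enumerate_nil, lastF]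
  | cons x xs ih =>
    intro s a b
    rw [PySem.List.enumerate_cons]
    simp only [List.foldl_cons]
    by_cases h1 : q1 x <;> by_cases h2 : q2 x <;>
      simp only [h1, h2, if_true, if_false, Bool.false_eq_true] <;>
      rw [ih] <;> simp [lastF, h1, h2]

theorem lastF_append (q : List (String × String) → Bool)
    (x : List (String × String)) :
    ∀ (u : List (List (String × String))) (s a : Int),
    lastF q (u ++ [x]) s a = if q x then s + (u.length : Int) else lastF q u s a := by
  intro u
  induction u with
  | nil => intro s a; simp [lastF]
  | cons y ys ih =>
    intro s a
    simp only [List.cons_append, lastF, ih]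
    by_cases h : q x
    · simp only [h, if_true, List.length_cons]
      push_cast
      ring
    · simp [h]

theorem enumerate_shift {α : Type} : ∀ (r : List α) (s : Int),
    PySem.List.enumerate r (s + 1)
      = (PySem.List.enumerate r s).map (fun p => (p.1 + 1, p.2)) := by
  intro r
  induction r with
  | nil => intro s; simp [PySem.List.enumerate_nil]
  | cons x xs ih =>
    intro s
    rw [PySem.List.enumerate_cons, PySem.List.enumerate_cons, List.map_cons]
    rw [show s + 1 + 1 = (s + 1) + 1 by ring, ih]

theorem altLastIndex_eq_lastF (t : String) (l : List (List (String × String))) :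
    altLastIndex l t = lastF (fun x => (PySem.Dict.mk x).get? "id" == some t) l 0 0 := by
  induction l using List.reverseRecOn with
  | nil => simp [altLastIndex, PySem.List.enumerate_nil, lastF]
  | append_singleton u x ih =>
    rw [lastF_append]
    unfold altLastIndex
    rw [List.reverse_append, List.reverse_singleton, List.singleton_append,
      PySem.List.enumerate_cons, List.find?_cons]
    by_cases h : ((PySem.Dict.mk x).get? "id" == some t) = true
    · simp [h]
    · simp only [h]
      rw [enumerate_shift u.reverse 0, List.find?_map]
      simp only [Function.comp_def]
      cases hf : (PySem.List.enumerate u.reverse 0).find?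
          (fun p => (PySem.Dict.mk p.2).get? "id" == some t) with
      | none =>
        unfold altLastIndex at ih
        rw [hf] at ih
        simpa [hf] using ih
      | some p =>
        have ih' : (u.length : Int) - 1 - p.1
            = lastF (fun x => (PySem.Dict.mk x).get? "id" == some t) u 0 0 := by
          unfold altLastIndex at ih
          rw [hf] at ih
          exact ih
        simp only [Option.map_some, List.length_append, List.length_cons,
          List.length_nil]
        push_cast
        linarith [ih']

-- ===== VERDICT (by name: the statement is the Claim_ definition above) =====
theorem get_route_segment_spec : Claim_equal_get_route_segment := by
  intro sl fs ts _ _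
  show get_route_segment sl fs ts = get_route_segment_alt sl fs ts
  unfold get_route_segment get_route_segment_alt
  rw [foldA_eq_lastF (fun x => (PySem.Dict.mk x).get? "id" == some fs)
    (fun x => (PySem.Dict.mk x).get? "id" == some ts) sl 0 0 0]
  rw [altLastIndex_eq_lastF, altLastIndex_eq_lastF]
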